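-- pv_equiv track=rewrite | github.com/zimzoum29/Python_Modules | 03/ex5/ft_data_stream.py | game_event_stream
-- ===== SOURCE A (Python) =====
-- from typing import Generator
--
-- def game_event_stream(total: int)\
--  -> Generator[tuple[str, int, str], None, None]:
--     """
--     Yields (player_name, level, action) one by one (streaming).
--     Output is deterministic to match the example style.
--     """
--
--     yield ("alice", 5, "killed monster")
--     yield ("bob", 12, "found treasure")
--     yield ("charlie", 8, "leveled up")
--
--     remaining = total - 3
--     remaining_high = 342 - 1
--     remaining_treasure = 89 - 1
--     remaining_levelup = 156 - 1
--     remaining_kill = remaining - remaining_treasure - remaining_levelup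
--
--     idx = 0
--
--     def player_name(i: int) -> str:
--         if i % 3 == 0:
--             return "alice"
--         if i % 3 == 1:
--             return "bob"
--         return "charlie"
--
--     i = 0
--     while i < remaining_treasure:
--         lvl = 10 + (idx % 10) if idx < remaining_high else 1 + (idx % 9)
--         yield (player_name(idx), lvl, "found treasure")
--         idx += 1
--         i += 1
--
--     i = 0
--     while i < remaining_levelup:
--         lvl = 10 + (idx % 10) if idx < remaining_high else 1 + (idx % 9)
--         yield (player_name(idx), lvl, "leveled up")
--         idx += 1
--         i += 1
--
--     i = 0
--     while i < remaining_kill: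
--         lvl = 10 + (idx % 10) if idx < remaining_high else 1 + (idx % 9)
--         yield (player_name(idx), lvl, "killed monster")
--         idx += 1
--         i += 1
-- ===== SOURCE B (Python) =====
-- from typing import Generator
--
-- def game_event_stream(total: int)\
--  -> Generator[tuple[str, int, str], None, None]:
--     """
--     Yields (player_name, level, action) one by one (streaming).
--     Columnar construction: build the three columns (players, levels,
--     actions) as whole lists by repetition/slicing, then zip them.
--     """
--     yield ("alice", 5, "killed monster")
--     yield ("bob", 12, "found treasure")
--     yield ("charlie", 8, "leveled up")
--
--     kills = max(0, total - 246)
--     n = 243 + kills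
--     actions = ["found treasure"] * 88 + ["leveled up"] * 155 + ["killed monster"] * kills
--     players = (["alice", "bob", "charlie"] * ((n + 2) // 3))[:n]
--     levels = [10 + i % 10 for i in range(min(n, 341))] + [1 + i % 9 for i in range(341, n)]
--     yield from zip(players, levels, actions)
-- ===== Notes on version B (the rewrite author's own statement) =====
-- stated objective: alternative
-- what changed: Replaced A's three sequential per-event while-loops sharing a running index by a columnar construction: the actions column built by list repetition, the players column by cyclic repetition and slicing, the levels column by two range comprehensions, then one zip of the three columns.
import Mathlib
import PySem

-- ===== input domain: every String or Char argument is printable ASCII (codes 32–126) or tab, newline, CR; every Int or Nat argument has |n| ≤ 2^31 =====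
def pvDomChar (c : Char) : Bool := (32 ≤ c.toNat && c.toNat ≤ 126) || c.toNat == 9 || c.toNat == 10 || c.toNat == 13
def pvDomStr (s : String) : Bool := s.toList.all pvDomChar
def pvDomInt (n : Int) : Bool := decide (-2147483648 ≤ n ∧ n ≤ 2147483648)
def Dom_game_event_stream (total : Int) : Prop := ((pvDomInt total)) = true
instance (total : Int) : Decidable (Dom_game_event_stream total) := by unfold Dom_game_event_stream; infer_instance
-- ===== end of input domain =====

-- B replaces A's three sequential per-event while-loops (shared running index) by a
-- columnar construction: build the players/levels/actions columns as whole lists, then zip.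

-- ===== PORT A =====
-- A's inner helper player_name
def pnameA (i : Int) : String :=
  if PySem.Int.mod i 3 = 0 then "alice"
  else if PySem.Int.mod i 3 = 1 then "bob"
  else "charlie"

-- one of A's 'while i < cnt' loops (hi = remaining_high); returns yielded list and final idx
def loopA (action : String) (hi cnt i idx : Int) : List (String × Int × String) × Int :=
  if h : i < cnt then
    let lvl := if idx < hi then 10 + PySem.Int.mod idx 10 else 1 + PySem.Int.mod idx 9
    let rest := loopA action hi cnt (i + 1) (idx + 1)
    ((pnameA idx, lvl, action) :: rest.1, rest.2)
  else ([], idx)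
termination_by (cnt - i).toNat
decreasing_by omega

def game_event_stream (total : Int) : List (String × Int × String) :=
  let remaining := total - 3
  let remaining_high := 342 - 1
  let remaining_treasure := 89 - 1
  let remaining_levelup := 156 - 1
  let remaining_kill := remaining - remaining_treasure - remaining_levelup
  let r1 := loopA "found treasure" remaining_high remaining_treasure 0 0
  let r2 := loopA "leveled up" remaining_high remaining_levelup 0 r1.2
  let r3 := loopA "killed monster" remaining_high remaining_kill 0 r2.2
  [("alice", 5, "killed monster"), ("bob", 12, "found treasure"), ("charlie", 8, "leveled up")]
    ++ r1.1 ++ r2.1 ++ r3.1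

-- ===== PORT B =====
-- '["x"] * k' with k possibly ≤ 0 is List.replicate k.toNat (toNat clamps at 0, like Python);
-- '[:n]' with 0 ≤ n is List.take n.toNat; Python's zip of three = nested List.zip.
def game_event_stream_alt (total : Int) : List (String × Int × String) :=
  let kills := max 0 (total - 246)
  let n := 243 + kills
  let actions := List.replicate 88 "found treasure" ++ List.replicate 155 "leveled up"
                 ++ List.replicate kills.toNat "killed monster"
  let players := (List.flatten (List.replicate (PySem.Int.floordiv (n + 2) 3).toNat
                    ["alice", "bob", "charlie"])).take n.toNat
  let levels := (PySem.List.pyRange 0 (min n 341) 1).map (fun i => 10 + PySem.Int.mod i 10)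
              ++ (PySem.List.pyRange 341 n 1).map (fun i => 1 + PySem.Int.mod i 9)
  [("alice", 5, "killed monster"), ("bob", 12, "found treasure"), ("charlie", 8, "leveled up")]
    ++ List.zip players (List.zip levels actions)

-- ===== PRECONDITION & SPEC =====
def Spec_game_event_stream (total : Int) (out : List (String × Int × String)) : Prop := out = game_event_stream_alt total
instance (total : Int) (out : List (String × Int × String)) : Decidable (Spec_game_event_stream total out) := by unfold Spec_game_event_stream; infer_instance

-- ===== CLAIM (what is proved, stated in full; the proofs are below) =====
def Claim_equal_game_event_stream : Prop := ∀ (total : Int), Dom_game_event_stream total → Spec_game_event_stream total (game_event_stream total)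

-- ===== LEMMAS AND PROOFS =====

-- the tuple produced at absolute index j (hi = 341) with action a
def evA (a : String) (j : Int) : String × Int × String :=
  (pnameA j,
   (if j < 341 then 10 + PySem.Int.mod j 10 else 1 + PySem.Int.mod j 9),
   a)

theorem loopA_eq (a : String) : ∀ (fuel : Nat) (cnt i idx : Int), (cnt - i).toNat = fuel →
    loopA a 341 cnt i idx =
      ((List.range fuel).map (fun (k : Nat) => evA a (idx + (k : Int))), idx + fuel) := by
  intro fuel
  induction fuel with
  | zero =>
    intro cnt i idx hf
    rw [loopA]
    have : ¬ i < cnt := by omega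
    simp [this]
  | succ m ih =>
    intro cnt i idx hf
    rw [loopA]
    have hlt : i < cnt := by omega
    simp only [dif_pos hlt]
    rw [ih cnt (i + 1) (idx + 1) (by omega)]
    rw [Prod.ext_iff]
    refine ⟨?_, by push_cast; ring⟩
    rw [List.range_succ_eq_map, List.map_cons, List.map_map, List.cons_eq_cons]
    refine ⟨by simp [evA], ?_⟩
    apply List.map_congr_left
    intro k _
    exact congrArg (evA a) (by push_cast; ring)

-- players cycle: flatten of replicated 3-list = map of k % 3 over range (3*m)
theorem cyc_eq (m : Nat) :
    List.flatten (List.replicate m ["alice", "bob", "charlie"]) =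
      (List.range (3 * m)).map (fun (k : Nat) => pnameA (k : Int)) := by
  induction m with
  | zero => simp
  | succ p ih =>
    rw [List.replicate_succ, List.flatten_cons, ih,
        show 3 * (p + 1) = 3 + 3 * p from by ring, List.range_add, List.map_append]
    refine congrArg₂ (· ++ ·) (by decide) ?_
    rw [List.map_map]
    apply List.map_congr_left
    intro k _
    simp only [Function.comp_apply]
    have : ((3 + k : Nat) : Int) = (k : Int) + 3 := by push_cast; ring
    rw [this]
    simp only [pnameA]
    have h3 : PySem.Int.mod ((k : Int) + 3) 3 = PySem.Int.mod (k : Int) 3 := by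
      simp [PySem.Int.mod]
    rw [h3]

-- the tuple B produces at absolute index j
def evB (j : Int) : String × Int × String :=
  (pnameA j,
   (if j < 341 then 10 + PySem.Int.mod j 10 else 1 + PySem.Int.mod j 9),
   (if j < 88 then "found treasure" else if j < 243 then "leveled up" else "killed monster"))

set_option maxRecDepth 8192 in
theorem B_eq (K : Nat) :
    List.zip
      ((List.flatten (List.replicate (PySem.Int.floordiv ((243 + (K : Int)) + 2) 3).toNat
          ["alice", "bob", "charlie"])).take (243 + (K : Int)).toNat)
      (List.zip
        ((PySem.List.pyRange 0 (min (243 + (K : Int)) 341) 1).map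
            (fun i => 10 + PySem.Int.mod i 10)
          ++ (PySem.List.pyRange 341 (243 + (K : Int)) 1).map
            (fun i => 1 + PySem.Int.mod i 9))
        (List.replicate 88 "found treasure" ++ List.replicate 155 "leveled up"
          ++ List.replicate K "killed monster"))
    = (List.range (243 + K)).map (fun (k : Nat) => evB (k : Int)) := by
  have hN : (243 + (K : Int)).toNat = 243 + K := by omega
  -- players column
  have hfd : PySem.Int.floordiv ((243 + (K : Int)) + 2) 3 = (((245 + K) / 3 : Nat) : Int) := by
    have h : (243 + (K : Int)) + 2 = ((245 + K : Nat) : Int) := by push_cast; ring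
    rw [h]
    exact_mod_cast PySem.Int.floordiv_natCast (245 + K) 3
  have hplayers :
      (List.flatten (List.replicate (PySem.Int.floordiv ((243 + (K : Int)) + 2) 3).toNat
          ["alice", "bob", "charlie"])).take (243 + (K : Int)).toNat
        = (List.range (243 + K)).map (fun (k : Nat) => pnameA (k : Int)) := by
    rw [hfd, Int.toNat_natCast, cyc_eq, hN, ← List.map_take, List.take_range]
    have : min (243 + K) (3 * ((245 + K) / 3)) = 243 + K := by omega
    rw [this]
  -- levels column
  have hlevels :
      ((PySem.List.pyRange 0 (min (243 + (K : Int)) 341) 1).map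
          (fun i => 10 + PySem.Int.mod i 10)
        ++ (PySem.List.pyRange 341 (243 + (K : Int)) 1).map
          (fun i => 1 + PySem.Int.mod i 9))
        = (List.range (243 + K)).map (fun (k : Nat) =>
            if (k : Int) < 341 then 10 + PySem.Int.mod (k : Int) 10
            else 1 + PySem.Int.mod (k : Int) 9) := by
    rw [PySem.List.pyRange_one, PySem.List.pyRange_one]
    have h1 : (min (243 + (K : Int)) 341 - 0).toNat = min (243 + K) 341 := by omega
    have h2 : (243 + (K : Int) - 341).toNat = (243 + K) - 341 := by omega
    rw [h1, h2]
    set M1 : Nat := min (243 + K) 341 with hM1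
    set M2 : Nat := 243 + K - 341 with hM2
    rw [show 243 + K = M1 + M2 from by omega, List.range_add]
    simp only [List.map_append, List.map_map]
    refine congrArg₂ (· ++ ·) ?_ ?_
    · apply List.map_congr_left
      intro k hk
      rw [List.mem_range] at hk
      simp only [Function.comp_apply]
      rw [if_pos (show ((k : Nat) : Int) < 341 from by omega)]
      norm_num
    · apply List.map_congr_left
      intro k hk
      rw [List.mem_range] at hk
      have hmin : M1 = 341 := by omega
      simp only [Function.comp_apply, hmin]
      rw [if_neg (show ¬ (((341 + k : Nat) : Int) < 341) from by push_cast; omega)]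
      push_cast
      ring_nf
  -- actions column
  have hactions :
      (List.replicate 88 "found treasure" ++ List.replicate 155 "leveled up"
          ++ List.replicate K "killed monster")
        = (List.range (243 + K)).map (fun (k : Nat) =>
            if (k : Int) < 88 then "found treasure"
            else if (k : Int) < 243 then "leveled up" else "killed monster") := by
    rw [show 243 + K = 88 + (155 + K) from by omega, List.range_add, List.range_add,
        List.append_assoc]
    simp only [List.map_append, List.map_map]
    refine congrArg₂ (· ++ ·) ?_ (congrArg₂ (· ++ ·) ?_ ?_) <;>
    · rw [show ∀ (c : String) (n : Nat), List.replicate n c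
            = (List.range n).map (fun _ => c) from
          fun c n => by rw [List.map_const', List.length_range]]
      apply List.map_congr_left
      intro k hk
      rw [List.mem_range] at hk
      try simp only [Function.comp_apply]
      split_ifs <;> first | rfl | (exfalso; push_cast at *; omega)
  rw [hplayers, hlevels, hactions, List.zip_map', List.zip_map']
  apply List.map_congr_left
  intro k _
  rfl

theorem alt_eq (total : Int) :
    game_event_stream_alt total =
      [("alice", 5, "killed monster"), ("bob", 12, "found treasure"), ("charlie", 8, "leveled up")]
        ++ (List.range (243 + (total - 246).toNat)).map (fun (k : Nat) => evB (k : Int)) := by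
  simp only [game_event_stream_alt]
  have hmax : max 0 (total - 246) = (((total - 246).toNat : Nat) : Int) := by omega
  rw [hmax, Int.toNat_natCast, B_eq]

theorem game_event_stream_spec : Claim_equal_game_event_stream := by
  intro total _
  simp only [Spec_game_event_stream]
  rw [alt_eq]
  simp only [game_event_stream]
  norm_num
  set K : Nat := (total - 246).toNat with hK
  rw [loopA_eq "found treasure" 88 88 0 0 (by omega)]
  rw [loopA_eq "leveled up" 155 155 0 ((0 : Int) + ((88 : Nat) : Int)) (by omega)]
  rw [loopA_eq "killed monster" K (total - 3 - 88 - 155) 0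
        ((0 : Int) + ((88 : Nat) : Int) + ((155 : Nat) : Int)) (by omega)]
  rw [show (243 : Nat) + K = 88 + (155 + K) from by omega,
      List.range_add, List.range_add]
  simp only [List.map_append, List.map_map]
  refine congrArg₂ (· ++ ·) ?_ (congrArg₂ (· ++ ·) ?_ ?_) <;>
  · apply List.map_congr_left
    intro k hk
    rw [List.mem_range] at hk
    simp only [Function.comp_apply, evA, evB]
    push_cast
    ring_nf
    split_ifs <;> first | rfl | omega
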